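-- pv_equiv track=rewrite | github.com/Able2c/gemma-cognitive-architecture | monitor.py | detect_deflection
-- ===== SOURCE A (Python) =====
-- from typing import Optional
--
-- def detect_deflection(draft: str, user_input: str) -> Optional[str]:
--     """Detect when response bounces the question back without substance."""
--     draft_lower = draft.lower().strip()
--
--     deflect_phrases = [
--         "what would you like", "what do you want", "your pick",
--         "what should we", "what topic", "let's discuss",
--         "what aspect", "what area", "shall we",
--         "would you like to share", "would you care to share",
--         "fancy exploring", "fancy sharing", "let's explore",
--         "let's dive", "let's keep exploring",
--         "always eager to learn", "eager to learn from",
--         "what have you discovered", "anything new",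
--         "caught your interest", "what's on your mind",
--     ]
--     if any(p in draft_lower for p in deflect_phrases):
--         return (
--             "DEFLECTION: Response bounces the conversation back to user "
--             "without providing substance first. Give your OWN thought, "
--             "then optionally ask a question."
--         )
--
--     # Pure question response (no substance)
--     sentences = [s.strip() for s in draft.replace("!", ".").replace("?", "?|").split("|") if s.strip()]
--     non_question = [s for s in sentences if not s.rstrip().endswith("?")]
--     if len(non_question) == 0 and len(sentences) > 0:
--         return "DEFLECTION: Response is pure questions with no substance."
--
--     return None
-- ===== SOURCE B (Python) =====
-- from typing import Optional
--
--
-- def detect_deflection(draft: str, user_input: str) -> Optional[str]: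
--     """Detect when response bounces the question back without substance."""
--     draft_lower = draft.lower().strip()
--
--     deflect_phrases = [
--         "what would you like", "what do you want", "your pick",
--         "what should we", "what topic", "let's discuss",
--         "what aspect", "what area", "shall we",
--         "would you like to share", "would you care to share",
--         "fancy exploring", "fancy sharing", "let's explore",
--         "let's dive", "let's keep exploring",
--         "always eager to learn", "eager to learn from",
--         "what have you discovered", "anything new",
--         "caught your interest", "what's on your mind",
--     ]
--     if any(p in draft_lower for p in deflect_phrases):
--         return (
--             "DEFLECTION: Response bounces the conversation back to user "
--             "without providing substance first. Give your OWN thought, "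
--             "then optionally ask a question."
--         )
--
--     # Pure question response: every sentence ends with '?', i.e. the draft
--     # itself ends with '?' once trailing whitespace is removed.
--     if draft.rstrip().endswith("?"):
--         return "DEFLECTION: Response is pure questions with no substance."
--
--     return None
-- ===== Notes on version B (the rewrite author's own statement) =====
-- stated objective: simpler
-- what changed: The sentence-splitting block (replace '!'->'.', replace '?'->'?|', split on '|', two list comprehensions and two length tests) is replaced by the single closed-form test draft.rstrip().endswith('?'), which is provably equivalent whenever the draft contains no literal '|'.
-- outside the precondition, e.g. on detect_deflection('?|', ''): A returns 'DEFLECTION: Response is pure questions with no substance.', B returns None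
import Mathlib
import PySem

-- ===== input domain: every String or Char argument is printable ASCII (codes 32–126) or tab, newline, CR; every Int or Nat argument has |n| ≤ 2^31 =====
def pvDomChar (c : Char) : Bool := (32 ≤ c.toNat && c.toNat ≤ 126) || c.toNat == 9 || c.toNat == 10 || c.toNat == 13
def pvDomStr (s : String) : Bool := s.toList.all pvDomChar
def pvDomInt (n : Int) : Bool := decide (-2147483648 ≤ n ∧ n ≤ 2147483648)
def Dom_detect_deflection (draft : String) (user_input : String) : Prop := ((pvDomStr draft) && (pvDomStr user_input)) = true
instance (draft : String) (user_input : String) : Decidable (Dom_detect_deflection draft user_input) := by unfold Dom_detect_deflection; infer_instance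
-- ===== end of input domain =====

-- B replaces A's sentence-splitting block (replace/replace/split/two comprehensions) by the
-- closed-form test draft.rstrip().endswith('?'); objective: simpler.


-- ===== PORT A =====
def pvDeflectPhrases : List String := [
    "what would you like", "what do you want", "your pick",
    "what should we", "what topic", "let's discuss",
    "what aspect", "what area", "shall we",
    "would you like to share", "would you care to share",
    "fancy exploring", "fancy sharing", "let's explore",
    "let's dive", "let's keep exploring",
    "always eager to learn", "eager to learn from",
    "what have you discovered", "anything new",
    "caught your interest", "what's on your mind"]

def pvMsgBounce : String := "DEFLECTION: Response bounces the conversation back to user without providing substance first. Give your OWN thought, then optionally ask a question."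

def pvMsgPure : String := "DEFLECTION: Response is pure questions with no substance."

def detect_deflection (draft : String) (user_input : String) : Option String :=
  let draft_lower := PySem.Str.strip (PySem.Str.lower draft)
  if pvDeflectPhrases.any (fun p => PySem.Str.isIn p draft_lower) then
    some pvMsgBounce
  else
    -- sentences = [s.strip() for s in draft.replace("!",".").replace("?","?|").split("|") if s.strip()]
    -- (string machinery kept on List Char via PySem.Chars, exact)
    let sentences :=
      ((PySem.Chars.splitOn
          (PySem.Chars.replace (PySem.Chars.replace draft.toList ['!'] ['.']) ['?'] ['?', '|'])
          ['|']).filter (fun s => !(PySem.Chars.strip s).isEmpty)).map PySem.Chars.strip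
    let non_question := sentences.filter (fun s => !PySem.Chars.endswith (PySem.Chars.rstrip s) ['?'])
    if non_question.length = 0 ∧ 0 < sentences.length then
      some pvMsgPure
    else
      none

-- ===== PORT B =====
def detect_deflection_alt (draft : String) (user_input : String) : Option String :=
  let draft_lower := PySem.Str.strip (PySem.Str.lower draft)
  if pvDeflectPhrases.any (fun p => PySem.Str.isIn p draft_lower) then
    some pvMsgBounce
  else if PySem.Str.endswith (PySem.Str.rstrip draft) "?" then
    some pvMsgPure
  else
    none

-- ===== PRECONDITION & SPEC =====
-- Pre_ excludes drafts containing a literal '|': A uses '|' as its internal sentence-separator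
-- sentinel, so such drafts get split at the '|' accidentally — a corner no caller would specify.
def Pre_detect_deflection (draft : String) (user_input : String) : Prop := '|' ∉ draft.toList
instance (draft : String) (user_input : String) : Decidable (Pre_detect_deflection draft user_input) := by unfold Pre_detect_deflection; infer_instance

def pvWitness_detect_deflection : String × String := ("Paris is the capital. Why do you ask?", "hi")

def Spec_detect_deflection (draft : String) (user_input : String) (out : Option String) : Prop := out = detect_deflection_alt draft user_input
instance (draft : String) (user_input : String) (out : Option String) : Decidable (Spec_detect_deflection draft user_input out) := by unfold Spec_detect_deflection; infer_instance

-- ===== CLAIM (what is proved, stated in full; the proofs are below) =====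
def Claim_equal_detect_deflection : Prop := ∀ (draft : String) (user_input : String), Dom_detect_deflection draft user_input → Pre_detect_deflection draft user_input → Spec_detect_deflection draft user_input (detect_deflection draft user_input)

-- ===== LEMMAS AND PROOFS =====

-- character-level transforms of A's pipeline
def pvG (c : Char) : Char := if c = '!' then '.' else c
def pvH (c : Char) : List Char := if c = '?' then ['?', '|'] else [pvG c]

-- the pieces A's split produces, computed directly from the draft
def pvParts : List Char → List (List Char)
  | [] => [[]]
  | c :: t => if c = '?' then ['?'] :: pvParts t else (pvParts t).modifyHead (fun p => pvG c :: p)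

lemma pvParts_ne_nil (l : List Char) : pvParts l ≠ [] := by
  induction l with
  | nil => simp [pvParts]
  | cons c t ih =>
    unfold pvParts
    split_ifs
    · simp
    · cases h : pvParts t with
      | nil => exact absurd h ih
      | cons p ps => simp [h, List.modifyHead]

lemma replace_go_bang (l : List Char) : ∀ (fuel : Nat) (acc : List Char), l.length ≤ fuel →
    PySem.Chars.replace.go ['!'] ['.'] fuel l acc = acc.reverse ++ l.map pvG := by
  induction l with
  | nil => intro fuel acc h; cases fuel <;> rw [PySem.Chars.replace.go] <;> simp
  | cons c t ih =>
    intro fuel acc h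
    cases fuel with
    | zero => simp at h
    | succ f =>
      rw [PySem.Chars.replace.go]
      by_cases hc : c = '!'
      · subst hc
        simp only [List.isPrefixOf, List.length_cons] at *
        rw [if_pos (by simp)]
        simp only [List.length_nil, List.drop_succ_cons, List.drop_zero]
        rw [ih f _ (by omega)]
        simp [pvG]
      · rw [if_neg (by simp [List.isPrefixOf, Ne.symm hc])]
        rw [ih f (c :: acc) (by simpa using h)]
        simp [pvG, hc]

lemma replace_bang (l : List Char) :
    PySem.Chars.replace l ['!'] ['.'] = l.map pvG := by
  rw [PySem.Chars.replace]
  rw [if_neg (by simp)]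
  simpa using replace_go_bang l l.length [] le_rfl

lemma replace_go_q (l : List Char) : ∀ (fuel : Nat) (acc : List Char), l.length ≤ fuel →
    PySem.Chars.replace.go ['?'] ['?', '|'] fuel l acc
      = acc.reverse ++ l.flatMap (fun c => if c = '?' then ['?', '|'] else [c]) := by
  induction l with
  | nil => intro fuel acc h; cases fuel <;> rw [PySem.Chars.replace.go] <;> simp
  | cons c t ih =>
    intro fuel acc h
    cases fuel with
    | zero => simp at h
    | succ f =>
      rw [PySem.Chars.replace.go]
      by_cases hc : c = '?'
      · subst hc
        simp only [List.isPrefixOf, List.length_cons] at *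
        rw [if_pos (by simp)]
        simp only [List.length_nil, List.drop_succ_cons, List.drop_zero]
        rw [ih f _ (by omega)]
        simp
      · rw [if_neg (by simp [List.isPrefixOf, Ne.symm hc])]
        rw [ih f (c :: acc) (by simpa using h)]
        simp [hc]

lemma replace_q (l : List Char) :
    PySem.Chars.replace (l.map pvG) ['?'] ['?', '|'] = l.flatMap pvH := by
  rw [PySem.Chars.replace]
  rw [if_neg (by simp)]
  rw [replace_go_q (l.map pvG) (l.map pvG).length [] le_rfl]
  simp only [List.reverse_nil, List.nil_append, List.flatMap_map]
  congr 1
  funext a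
  by_cases h1 : a = '!' <;> by_cases h2 : a = '?' <;> simp [pvH, pvG, h1, h2]

lemma splitOn_go_nil (fuel : Nat) (cur : List Char) (acc : List (List Char)) :
    PySem.Chars.splitOn.go ['|'] fuel [] cur acc = (cur.reverse :: acc).reverse := by
  cases fuel <;> rw [PySem.Chars.splitOn.go.eq_def] <;> simp

lemma splitOn_go_cons (f : Nat) (c : Char) (rest cur : List Char) (acc : List (List Char)) :
    PySem.Chars.splitOn.go ['|'] (f + 1) (c :: rest) cur acc
      = if c = '|' then PySem.Chars.splitOn.go ['|'] f rest [] (cur.reverse :: acc)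
        else PySem.Chars.splitOn.go ['|'] f rest (c :: cur) acc := by
  rw [PySem.Chars.splitOn.go.eq_def]
  by_cases h : c = '|'
  · simp [h, List.isPrefixOf]
  · simp only [List.isPrefixOf, Bool.and_eq_true, beq_iff_eq]
    rw [if_neg (by simp [Ne.symm h]), if_neg h]

lemma splitOn_go_parts (l : List Char) : ∀ (fuel : Nat) (cur : List Char) (acc : List (List Char)),
    '|' ∉ l → (l.flatMap pvH).length ≤ fuel →
    PySem.Chars.splitOn.go ['|'] fuel (l.flatMap pvH) cur acc
      = acc.reverse ++ (pvParts l).modifyHead (fun p => cur.reverse ++ p) := by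
  induction l with
  | nil =>
    intro fuel cur acc _ _
    simp [splitOn_go_nil, pvParts, List.modifyHead]
  | cons c t ih =>
    intro fuel cur acc hmem hlen
    have hc_ne_bar : c ≠ '|' := fun h => hmem (h ▸ List.mem_cons_self ..)
    have hmem' : '|' ∉ t := fun h => hmem (List.mem_cons_of_mem _ h)
    obtain ⟨p, ps, hpp⟩ : ∃ p ps, pvParts t = p :: ps := by
      cases h : pvParts t with
      | nil => exact absurd h (pvParts_ne_nil t)
      | cons p ps => exact ⟨p, ps, rfl⟩
    by_cases hc : c = '?'
    · subst hc
      have hfm : List.flatMap pvH ('?' :: t) = '?' :: '|' :: List.flatMap pvH t := by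
        simp [pvH]
      rw [hfm] at hlen ⊢
      simp only [List.length_cons] at hlen
      cases fuel with
      | zero => omega
      | succ f =>
        rw [splitOn_go_cons, if_neg (by decide)]
        cases f with
        | zero => omega
        | succ f' =>
          rw [splitOn_go_cons, if_pos rfl]
          rw [ih f' [] _ hmem' (by omega)]
          simp [pvParts, hpp, List.modifyHead]
    · have hg_ne : pvG c ≠ '|' := by
        by_cases h1 : c = '!' <;> simp [pvG, h1, hc_ne_bar]
      have hfm : List.flatMap pvH (c :: t) = pvG c :: List.flatMap pvH t := by
        simp [pvH, hc]
      rw [hfm] at hlen ⊢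
      simp only [List.length_cons] at hlen
      cases fuel with
      | zero => omega
      | succ f =>
        rw [splitOn_go_cons, if_neg hg_ne]
        rw [ih f (pvG c :: cur) acc hmem' (by omega)]
        simp [pvParts, hc, hpp, List.modifyHead]

lemma splitOn_pipeline (l : List Char) (h : '|' ∉ l) :
    PySem.Chars.splitOn (l.flatMap pvH) ['|'] = pvParts l := by
  rw [PySem.Chars.splitOn]
  rw [splitOn_go_parts l _ [] [] h (by omega)]
  cases hp : pvParts l with
  | nil => exact absurd hp (pvParts_ne_nil l)
  | cons p ps => simp [List.modifyHead]

-- right-strip / strip toolkit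
lemma rstrip_cons (c : Char) (t : List Char) :
    PySem.Chars.rstrip (c :: t)
      = if PySem.Chars.rstrip t = [] then (if PySem.Chars.isspace c then [] else [c])
        else c :: PySem.Chars.rstrip t := by
  simp only [PySem.Chars.rstrip, List.reverse_cons, List.dropWhile_append, List.reverse_eq_nil_iff]
  by_cases h : List.dropWhile PySem.Chars.isspace t.reverse = []
  · simp only [h, List.isEmpty_nil, List.dropWhile]
    by_cases hs : PySem.Chars.isspace c <;> simp [hs]
  · simp [h, List.isEmpty_iff]

lemma rstrip_sublist (l : List Char) : List.Sublist (PySem.Chars.rstrip l) l := by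
  simp only [PySem.Chars.rstrip]
  have := List.dropWhile_sublist (l := l.reverse) (p := PySem.Chars.isspace)
  simpa using this.reverse

lemma strip_sublist (l : List Char) : List.Sublist (PySem.Chars.strip l) l := by
  simp only [PySem.Chars.strip, PySem.Chars.lstrip]
  exact (rstrip_sublist _).trans (List.dropWhile_sublist _)

lemma rstrip_ne_nil_of_mem_q (l : List Char) (h : '?' ∈ l) : PySem.Chars.rstrip l ≠ [] := by
  intro hnil
  simp only [PySem.Chars.rstrip, List.reverse_eq_nil_iff] at hnil
  have : PySem.Chars.isspace '?' = true :=
    List.dropWhile_eq_nil_iff.mp hnil '?' (by simpa using h)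
  simp [PySem.Chars.isspace] at this

lemma strip_cons (c : Char) (t : List Char) :
    PySem.Chars.strip (c :: t)
      = if PySem.Chars.isspace c then PySem.Chars.strip t else PySem.Chars.rstrip (c :: t) := by
  simp only [PySem.Chars.strip, PySem.Chars.lstrip, List.dropWhile_cons]
  by_cases hs : PySem.Chars.isspace c <;> simp [hs, PySem.Chars.lstrip]

lemma endswith_q_iff (s : List Char) :
    PySem.Chars.endswith s ['?'] = true ↔ ∃ q, s = q ++ ['?'] := by
  rw [PySem.Chars.endswith_iff]
  constructor
  · rintro ⟨t, rfl⟩; exact ⟨t, rfl⟩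
  · rintro ⟨q, rfl⟩; exact ⟨q, rfl⟩

lemma rstrip_append_q (q : List Char) :
    PySem.Chars.rstrip (q ++ ['?']) = q ++ ['?'] := by
  simp only [PySem.Chars.rstrip, List.reverse_append, List.reverse_cons, List.reverse_nil,
    List.nil_append, List.singleton_append, List.dropWhile_cons]
  simp [PySem.Chars.isspace]

lemma strip_append_q (q : List Char) :
    ∃ r, PySem.Chars.strip (q ++ ['?']) = r ++ ['?'] := by
  simp only [PySem.Chars.strip, PySem.Chars.lstrip, List.dropWhile_append]
  by_cases h : (List.dropWhile PySem.Chars.isspace q).isEmpty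
  · refine ⟨[], ?_⟩
    rw [if_pos h]
    have hq : List.dropWhile PySem.Chars.isspace ['?'] = [] ++ ['?'] := rfl
    rw [hq, rstrip_append_q]
  · refine ⟨List.dropWhile PySem.Chars.isspace q, ?_⟩
    rw [if_neg h, rstrip_append_q]

-- the closed-form condition B tests, on the char level
def pvEndsQ (l : List Char) : Bool := PySem.Chars.endswith (PySem.Chars.rstrip l) ['?']

lemma endsQ_mem (l : List Char) (h : pvEndsQ l = true) : '?' ∈ l := by
  obtain ⟨q, hq⟩ := (endswith_q_iff _).mp h
  exact (rstrip_sublist l).mem (by simp [hq])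

lemma endswith_q_singleton (c : Char) :
    (PySem.Chars.endswith [c] ['?'] = true) ↔ c = '?' := by
  rw [endswith_q_iff]
  constructor
  · rintro ⟨q, hq⟩
    cases q with
    | nil => simpa using hq
    | cons a as => have := congrArg List.length hq; simp at this
  · rintro rfl; exact ⟨[], rfl⟩

lemma endswith_q_cons_ne_nil (c : Char) (r : List Char) (hr : r ≠ []) :
    PySem.Chars.endswith (c :: r) ['?'] = PySem.Chars.endswith r ['?'] := by
  by_cases h : PySem.Chars.endswith r ['?'] = true
  · obtain ⟨q, hq⟩ := (endswith_q_iff _).mp h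
    have h2 : PySem.Chars.endswith (c :: r) ['?'] = true :=
      (endswith_q_iff _).mpr ⟨c :: q, by rw [hq]; rfl⟩
    rw [h, h2]
  · have h2 : ¬ PySem.Chars.endswith (c :: r) ['?'] = true := by
      intro hc2
      obtain ⟨q, hq⟩ := (endswith_q_iff _).mp hc2
      cases q with
      | nil => exact hr (List.cons.inj hq).2
      | cons a as => exact h ((endswith_q_iff _).mpr ⟨as, (List.cons.inj hq).2⟩)
    rw [Bool.not_eq_true] at h h2
    rw [h, h2]

lemma endsQ_cons (c : Char) (t : List Char) :
    (pvEndsQ (c :: t) = true)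
      ↔ (if PySem.Chars.rstrip t = [] then c = '?' else pvEndsQ t = true) := by
  unfold pvEndsQ
  rw [rstrip_cons]
  by_cases h : PySem.Chars.rstrip t = []
  · rw [if_pos h, if_pos h]
    by_cases hs : PySem.Chars.isspace c
    · rw [if_pos hs]
      constructor
      · intro hf; simp [PySem.Chars.endswith, List.isSuffixOf] at hf
      · rintro rfl; simp [PySem.Chars.isspace] at hs
    · rw [if_neg hs]
      exact endswith_q_singleton c
  · rw [if_neg h, if_neg h, endswith_q_cons_ne_nil c _ h]

lemma isspace_pvG (c : Char) : PySem.Chars.isspace (pvG c) = PySem.Chars.isspace c := by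
  by_cases h1 : c = '!' <;> simp [pvG, h1]
  rfl

lemma pvG_ne_q (c : Char) (h : c ≠ '?') : pvG c ≠ '?' := by
  by_cases h1 : c = '!' <;> simp [pvG, h1, h]

lemma pvParts_concat (l : List Char) : ∃ init p, pvParts l = init ++ [p] := by
  rcases List.eq_nil_or_concat (pvParts l) with hnil | ⟨L, b, hL⟩
  · exact absurd hnil (pvParts_ne_nil l)
  · exact ⟨L, b, by simpa using hL⟩

lemma pvParts_cons_q (t : List Char) : pvParts ('?' :: t) = ['?'] :: pvParts t := by
  simp [pvParts]

lemma pvParts_cons_ne (c : Char) (t : List Char) (hc : c ≠ '?') :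
    pvParts (c :: t) = (pvParts t).modifyHead (fun x => pvG c :: x) := by
  simp [pvParts, hc]

-- shape of the pieces: all but the last end in '?', the last contains no '?'
lemma pvParts_shape : ∀ (l : List Char) (init : List (List Char)) (p : List Char),
    pvParts l = init ++ [p] →
    (∀ q ∈ init, ∃ r, q = r ++ ['?']) ∧ '?' ∉ p := by
  intro l
  induction l with
  | nil =>
    intro init p h
    cases init with
    | nil =>
      simp only [pvParts, List.nil_append] at h
      injection h with hp
      exact ⟨by simp, by simp [← hp]⟩
    | cons a as =>
      have := congrArg List.length h
      simp [pvParts] at this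
  | cons c t ih =>
    intro init p h
    obtain ⟨p0, ps, hpp⟩ : ∃ p0 ps, pvParts t = p0 :: ps := by
      cases hx : pvParts t with
      | nil => exact absurd hx (pvParts_ne_nil t)
      | cons p0 ps => exact ⟨p0, ps, rfl⟩
    by_cases hc : c = '?'
    · subst hc
      rw [pvParts_cons_q] at h
      cases init with
      | nil =>
        simp only [List.nil_append] at h
        injection h with _ hrest
        exact absurd hrest (pvParts_ne_nil t)
      | cons a as =>
        rw [List.cons_append] at h
        injection h with ha hrest
        obtain ⟨h1, h2⟩ := ih as p hrest
        refine ⟨?_, h2⟩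
        intro q hq
        rcases List.mem_cons.mp hq with rfl | hq'
        · exact ⟨[], ha.symm ▸ rfl⟩
        · exact h1 q hq'
    · rw [pvParts_cons_ne c t hc, hpp] at h
      simp only [List.modifyHead] at h
      cases init with
      | nil =>
        simp only [List.nil_append] at h
        injection h with hp hps
        obtain ⟨_, h2⟩ := ih [] p0 (by rw [hpp, hps]; rfl)
        refine ⟨by simp, ?_⟩
        rw [← hp]
        intro hmem
        rcases List.mem_cons.mp hmem with hq | hq
        · exact pvG_ne_q c hc hq.symm
        · exact h2 hq
      | cons a as =>
        rw [List.cons_append] at h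
        injection h with ha hrest
        obtain ⟨h1, h2⟩ := ih (p0 :: as) p (by rw [hpp, hrest]; rfl)
        refine ⟨?_, h2⟩
        intro q hq
        rcases List.mem_cons.mp hq with rfl | hq'
        · obtain ⟨r, hr⟩ := h1 p0 (List.mem_cons_self ..)
          exact ⟨pvG c :: r, by rw [← ha, hr]; rfl⟩
        · exact h1 q (List.mem_cons_of_mem _ hq')

-- the last piece is blank iff the draft right-strips to nothing or ends in '?';
-- there are at least two pieces iff the draft contains a '?'
lemma pvParts_last_spec : ∀ (l : List Char) (init : List (List Char)) (p : List Char),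
    pvParts l = init ++ [p] →
    ((PySem.Chars.strip p = [] ↔ (PySem.Chars.rstrip l = [] ∨ pvEndsQ l = true))
      ∧ (init ≠ [] ↔ '?' ∈ l)) := by
  intro l
  induction l with
  | nil =>
    intro init p h
    cases init with
    | nil =>
      simp only [pvParts, List.nil_append] at h
      injection h with hp
      constructor
      · rw [← hp]
        simp [PySem.Chars.strip, PySem.Chars.lstrip, PySem.Chars.rstrip]
      · simp
    | cons a as =>
      have := congrArg List.length h
      simp [pvParts] at this
  | cons c t ih =>
    intro init p h
    obtain ⟨init', p', hdec⟩ := pvParts_concat t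
    obtain ⟨ihs, ihn⟩ := ih init' p' hdec
    by_cases hc : c = '?'
    · subst hc
      rw [pvParts_cons_q, hdec, ← List.cons_append] at h
      obtain ⟨hinit, hp⟩ := List.append_singleton_inj.mp h
      subst hp
      constructor
      · rw [ihs, rstrip_cons]
        by_cases hr : PySem.Chars.rstrip t = []
        · rw [if_pos hr, if_neg (by decide : ¬ PySem.Chars.isspace '?' = true)]
          constructor
          · intro _; right; rw [endsQ_cons, if_pos hr]
          · intro _; left; exact hr
        · rw [if_neg hr]
          rw [endsQ_cons, if_neg hr]
          simp [hr]
      · rw [← hinit]; simp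
    · rw [pvParts_cons_ne c t hc, hdec] at h
      cases hi' : init' with
      | nil =>
        subst hi'
        simp only [List.nil_append, List.modifyHead] at h
        obtain ⟨hinit, hp⟩ := List.append_singleton_inj.mp
          (show (([] : List (List Char)) ++ [pvG c :: p']) = init ++ [p] from by simpa using h)
        subst hp
        have hnq : '?' ∉ t := fun hm => (by simpa using ihn.mpr hm)
        have hQf : pvEndsQ t ≠ true := fun hq => hnq (endsQ_mem t hq)
        constructor
        · rw [strip_cons, isspace_pvG]
          by_cases hs : PySem.Chars.isspace c
          · rw [if_pos hs]
            rw [ihs, rstrip_cons]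
            by_cases hr : PySem.Chars.rstrip t = []
            · rw [if_pos hr, if_pos hs]
              constructor
              · intro _; left; rfl
              · intro _; left; exact hr
            · rw [if_neg hr, endsQ_cons, if_neg hr]
              simp [hr]
          · rw [if_neg hs]
            rw [rstrip_cons c t, endsQ_cons]
            have hgs : ¬ PySem.Chars.isspace (pvG c) = true := by
              rw [isspace_pvG]; exact hs
            rw [rstrip_cons (pvG c) p']
            by_cases hr : PySem.Chars.rstrip p' = [] <;>
              by_cases hrt : PySem.Chars.rstrip t = [] <;>
                simp [hr, hrt, hgs, hs, hc, hQf]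
        · rw [← hinit]
          simp only [ne_eq, not_true_eq_false, false_iff, List.mem_cons]
          push_neg
          exact ⟨fun hq => absurd hq.symm hc, hnq⟩
      | cons a as =>
        subst hi'
        simp only [List.cons_append, List.modifyHead] at h
        have hmem : '?' ∈ t := ihn.mp (by simp)
        have hrt : PySem.Chars.rstrip t ≠ [] := rstrip_ne_nil_of_mem_q t hmem
        rw [← List.cons_append] at h
        obtain ⟨hinit, hp⟩ := List.append_singleton_inj.mp h
        subst hp
        constructor
        · rw [ihs, rstrip_cons, if_neg hrt, endsQ_cons, if_neg hrt]
          simp [hrt]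
        · rw [← hinit]
          simp [List.mem_cons.mpr (Or.inr hmem)]

-- A's pure-question condition, computed on the pieces, is exactly B's closed-form test
lemma condA_iff (l : List Char) :
    (((((pvParts l).filter (fun s => !(PySem.Chars.strip s).isEmpty)).map PySem.Chars.strip).filter
        (fun s => !PySem.Chars.endswith (PySem.Chars.rstrip s) ['?'])).length = 0 ∧
      0 < (((pvParts l).filter (fun s => !(PySem.Chars.strip s).isEmpty)).map PySem.Chars.strip).length)
    ↔ pvEndsQ l = true := by
  obtain ⟨init, p, hd⟩ := pvParts_concat l
  obtain ⟨hends, hnq⟩ := pvParts_shape l init p hd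
  obtain ⟨hlast, hinit⟩ := pvParts_last_spec l init p hd
  rw [hd]
  have hfi : init.filter (fun s => !(PySem.Chars.strip s).isEmpty) = init := by
    rw [List.filter_eq_self]
    intro q hq
    obtain ⟨r, rfl⟩ := hends q hq
    obtain ⟨r', hr'⟩ := strip_append_q r
    simp [hr']
  have hqi : List.filter (fun s => !PySem.Chars.endswith (PySem.Chars.rstrip s) ['?'])
      (init.map PySem.Chars.strip) = [] := by
    rw [List.filter_eq_nil_iff]
    intro s hs
    obtain ⟨q, hq, rfl⟩ := List.mem_map.mp hs
    obtain ⟨r, rfl⟩ := hends q hq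
    obtain ⟨r', hr'⟩ := strip_append_q r
    rw [hr', rstrip_append_q]
    simp [(endswith_q_iff _).mpr ⟨r', rfl⟩]
  rw [List.filter_append, hfi, List.map_append, List.filter_append, hqi]
  by_cases hp : PySem.Chars.strip p = []
  · have hfp : List.filter (fun s => !(PySem.Chars.strip s).isEmpty) [p] = [] := by
      simp [hp]
    rw [hfp]
    simp only [List.map_nil, List.append_nil, List.filter_nil, List.length_nil, List.nil_append]
    constructor
    · rintro ⟨_, hlen⟩
      have hne : init ≠ [] := by
        intro h0
        rw [h0] at hlen
        simp at hlen
      rcases hlast.mp hp with hr0 | hQ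
      · exact absurd hr0 (rstrip_ne_nil_of_mem_q l (hinit.mp hne))
      · exact hQ
    · intro hQ
      refine ⟨trivial, ?_⟩
      have hne : init ≠ [] := hinit.mpr (endsQ_mem l hQ)
      simpa [List.length_pos_iff] using hne
  · have hfp : List.filter (fun s => !(PySem.Chars.strip s).isEmpty) [p] = [p] := by
      simp [hp]
    rw [hfp]
    have hnp : (!PySem.Chars.endswith (PySem.Chars.rstrip (PySem.Chars.strip p)) ['?']) = true := by
      rw [Bool.not_eq_eq_eq_not]
      by_contra hcon
      have h1 : PySem.Chars.endswith (PySem.Chars.rstrip (PySem.Chars.strip p)) ['?'] = true := by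
        cases hx : PySem.Chars.endswith (PySem.Chars.rstrip (PySem.Chars.strip p)) ['?'] with
        | true => rfl
        | false => exact absurd hx (by simpa using hcon)
      obtain ⟨q, hq⟩ := (endswith_q_iff _).mp h1
      have hmem : '?' ∈ p :=
        (strip_sublist p).mem ((rstrip_sublist (PySem.Chars.strip p)).mem (by simp [hq]))
      exact hnq hmem
    constructor
    · rintro ⟨h0, _⟩
      rw [List.map_cons, List.map_nil, List.filter_cons, if_pos (by simpa using hnp)] at h0
      simp at h0
    · intro hQ
      exact absurd (hlast.mpr (Or.inr hQ)) hp

-- ===== VERDICT (by name: the statement is the Claim_ definition above) =====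
theorem detect_deflection_spec : Claim_equal_detect_deflection := by
  intro draft user_input _ hpre
  unfold Spec_detect_deflection detect_deflection detect_deflection_alt
  simp only [replace_bang, replace_q, splitOn_pipeline draft.toList hpre]
  have hB : (PySem.Str.endswith (PySem.Str.rstrip draft) "?" = true)
      ↔ (pvEndsQ draft.toList = true) := by
    rw [PySem.Str.endswith_eq, PySem.Str.toList_rstrip]
    exact Iff.rfl
  split_ifs with h1 h2 h3 h4
  · rfl
  · rfl
  · exact absurd (hB.mpr ((condA_iff _).mp h2)) h3
  · exact absurd ((condA_iff _).mpr (hB.mp h4)) h2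
  · rfl
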